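-- pv_equiv track=rewrite | github.com/uma-logic-user/UMALOGI | src/evaluation/evaluator.py | _has_refund
-- ===== SOURCE A (Python) =====
-- def _has_refund(
--     horse_names: list[str],
--     horse_numbers: dict[str, int],
--     refund_numbers: set[int],
-- ) -> bool:
--     """予想に含まれる馬番が返還対象かどうかを判定。"""
--     for name in horse_names:
--         n = horse_numbers.get(name)
--         if n is not None and n in refund_numbers:
--             return True
--     return False
-- ===== SOURCE B (Python) =====
-- def _has_refund(
--     horse_names: list[str],
--     horse_numbers: dict[str, int],
--     refund_numbers: set[int],
-- ) -> bool:
--     """予想に含まれる馬番が返還対象かどうかを判定。"""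
--     names = set(horse_names)
--     return any(num in refund_numbers and name in names
--                for name, num in horse_numbers.items())
-- ===== Notes on version B (the rewrite author's own statement) =====
-- stated objective: alternative
-- what changed: Inverts the traversal: instead of scanning the prediction list and looking each name up in the dict, B builds a set of predicted names once and scans the mapping's items, testing each mapped number against the refund set and each key against the name set; correct because dict keys are unique, so get(name)==n iff (name,n) is an item.
import Mathlib
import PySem

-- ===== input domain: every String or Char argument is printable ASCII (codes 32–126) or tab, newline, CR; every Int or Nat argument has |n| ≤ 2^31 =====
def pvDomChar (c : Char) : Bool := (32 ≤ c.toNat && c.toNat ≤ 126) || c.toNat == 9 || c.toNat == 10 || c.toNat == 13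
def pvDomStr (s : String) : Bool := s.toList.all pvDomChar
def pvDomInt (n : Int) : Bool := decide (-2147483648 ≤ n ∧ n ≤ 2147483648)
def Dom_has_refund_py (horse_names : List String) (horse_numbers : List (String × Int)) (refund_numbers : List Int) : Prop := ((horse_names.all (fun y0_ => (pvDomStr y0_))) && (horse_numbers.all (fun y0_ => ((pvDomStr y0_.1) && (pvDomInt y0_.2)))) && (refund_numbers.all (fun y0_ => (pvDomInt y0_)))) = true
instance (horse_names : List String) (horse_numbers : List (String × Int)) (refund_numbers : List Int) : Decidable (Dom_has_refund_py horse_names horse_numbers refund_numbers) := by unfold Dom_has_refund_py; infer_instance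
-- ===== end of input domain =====

-- B inverts the traversal: instead of scanning the prediction list with per-name dict
-- lookups, it builds a set of predicted names once and scans the mapping's items,
-- testing each mapped number against the refund set (alternative; same overall cost).


-- ===== PORT A =====
-- for name in horse_names: n = horse_numbers.get(name); if n is not None and n in refund_numbers: return True
def has_refund_py (horse_names : List String) (horse_numbers : List (String × Int)) (refund_numbers : List Int) : Bool :=
  match horse_names with
  | [] => false
  | name :: rest =>
    match (PySem.Dict.mk horse_numbers).get? name with
    | some n => if PySem.Set.contains refund_numbers n then true
                else has_refund_py rest horse_numbers refund_numbers
    | none => has_refund_py rest horse_numbers refund_numbers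

-- ===== PORT B =====
-- names = set(horse_names); return any(num in refund_numbers and name in names for name, num in horse_numbers.items())
def has_refund_py_alt (horse_names : List String) (horse_numbers : List (String × Int)) (refund_numbers : List Int) : Bool :=
  let names : PySem.Set String := PySem.Set.ofList horse_names
  ((PySem.Dict.mk horse_numbers).items).any
    (fun p => PySem.Set.contains refund_numbers p.2 && PySem.Set.contains names p.1)

-- ===== PRECONDITION & SPEC =====
-- Pre_ excludes association lists with duplicate keys: they do not represent any Python
-- dict (a dict's keys are unique), so no input the Python A accepts is lost.
def Pre_has_refund_py (horse_names : List String) (horse_numbers : List (String × Int)) (refund_numbers : List Int) : Prop :=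
  (horse_numbers.map Prod.fst).Nodup
instance (horse_names : List String) (horse_numbers : List (String × Int)) (refund_numbers : List Int) : Decidable (Pre_has_refund_py horse_names horse_numbers refund_numbers) := by unfold Pre_has_refund_py; infer_instance

def pvWitness_has_refund_py : List String × (List (String × Int)) × List Int :=
  (["a", "b"], [("a", 3), ("b", 4)], [4])

def Spec_has_refund_py (horse_names : List String) (horse_numbers : List (String × Int)) (refund_numbers : List Int) (out : Bool) : Prop := out = has_refund_py_alt horse_names horse_numbers refund_numbers
instance (horse_names : List String) (horse_numbers : List (String × Int)) (refund_numbers : List Int) (out : Bool) : Decidable (Spec_has_refund_py horse_names horse_numbers refund_numbers out) := by unfold Spec_has_refund_py; infer_instance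

-- ===== CLAIM (what is proved, stated in full; the proofs are below) =====
def Claim_equal_has_refund_py : Prop := ∀ (horse_names : List String) (horse_numbers : List (String × Int)) (refund_numbers : List Int), Dom_has_refund_py horse_names horse_numbers refund_numbers → Pre_has_refund_py horse_names horse_numbers refund_numbers → Spec_has_refund_py horse_names horse_numbers refund_numbers (has_refund_py horse_names horse_numbers refund_numbers)

-- ===== LEMMAS AND PROOFS =====

-- A returns true iff some name in horse_names maps (first match) to a number in refund_numbers.
lemma hasA_iff (hn : List String) (hm : List (String × Int)) (rn : List Int) :
    has_refund_py hn hm rn = true ↔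
    ∃ name ∈ hn, ∃ n, (PySem.Dict.mk hm).get? name = some n ∧ n ∈ rn := by
  induction hn with
  | nil => simp [has_refund_py]
  | cons name rest ih =>
    simp only [has_refund_py]
    cases hg : (PySem.Dict.mk hm).get? name with
    | none =>
      simp only [ih, List.mem_cons]
      constructor
      · rintro ⟨x, hx, hrest⟩; exact ⟨x, Or.inr hx, hrest⟩
      · rintro ⟨x, hx | hx, n, hn', hmem⟩
        · subst hx; rw [hg] at hn'; cases hn'
        · exact ⟨x, hx, n, hn', hmem⟩
    | some n =>
      by_cases hc : PySem.Set.contains rn n = true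
      · simp only [hc, if_true, true_iff]
        exact ⟨name, List.mem_cons_self, n, hg, (PySem.Set.contains_iff rn n).1 hc⟩
      · simp only [hc, if_false, Bool.false_eq_true, ih, List.mem_cons]
        constructor
        · rintro ⟨x, hx, hrest⟩; exact ⟨x, Or.inr hx, hrest⟩
        · rintro ⟨x, hx | hx, k, hk, hkmem⟩
          · subst hx; rw [hg, Option.some.injEq] at hk; subst hk
            exact absurd ((PySem.Set.contains_iff rn n).2 hkmem) hc
          · exact ⟨x, hx, k, hk, hkmem⟩

-- B returns true iff some item (name, n) of the mapping has n in refund_numbers and name predicted.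
lemma hasB_iff (hn : List String) (hm : List (String × Int)) (rn : List Int) :
    has_refund_py_alt hn hm rn = true ↔
    ∃ p ∈ hm, p.2 ∈ rn ∧ p.1 ∈ hn := by
  simp only [has_refund_py_alt, List.any_eq_true, Bool.and_eq_true,
    PySem.Set.contains_iff, PySem.Set.mem_ofList]

-- Under unique keys, first-match lookup coincides with item membership.
lemma get?_eq_some_iff_mem (hm : List (String × Int)) (h : (hm.map Prod.fst).Nodup)
    (k : String) (v : Int) :
    (PySem.Dict.mk hm).get? k = some v ↔ (k, v) ∈ hm := by
  have hk : (PySem.Dict.mk hm).keys.Nodup := h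
  exact PySem.Dict.get?_eq_some_iff_mem_items (d := PySem.Dict.mk hm) (k := k) (v := v) hk

-- ===== VERDICT (by name: the statement is the Claim_ definition above) =====
theorem has_refund_py_spec : Claim_equal_has_refund_py := by
  intro hn hm rn _ hpre
  unfold Spec_has_refund_py
  have key : has_refund_py hn hm rn = true ↔ has_refund_py_alt hn hm rn = true := by
    rw [hasA_iff, hasB_iff]
    constructor
    · rintro ⟨name, hname, n, hg, hmem⟩
      exact ⟨(name, n), (get?_eq_some_iff_mem hm hpre name n).1 hg, hmem, hname⟩
    · rintro ⟨⟨name, n⟩, hp, hmem, hname⟩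
      exact ⟨name, hname, n, (get?_eq_some_iff_mem hm hpre name n).2 hp, hmem⟩
  rcases hA : has_refund_py hn hm rn with _ | _
  · rcases hB : has_refund_py_alt hn hm rn with _ | _
    · rfl
    · exact absurd (key.2 hB) (by simp [hA])
  · exact (key.1 hA).symm
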